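-- pv_equiv track=rewrite | github.com/OpShin/opshin | opshin/std/math.py | and_8bit
-- ===== SOURCE A (Python) =====
-- EIGHT_BIT_POWERS = [1, 2, 4, 8, 16, 32, 64, 128]
--
-- def and_8bit(a: int, b: int) -> int:
--     result = 0
--     for power in EIGHT_BIT_POWERS:
--         bit_a = (a // power) % 2
--         bit_b = (b // power) % 2
--         bit_and = bit_a * bit_b
--         result = result + bit_and * power
--     return result
-- ===== SOURCE B (Python) =====
-- def and_8bit(a: int, b: int) -> int:
--     return (a % 256) & (b % 256)
-- ===== Notes on version B (the rewrite author's own statement) =====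
-- stated objective: idiomatic
-- what changed: Replaced the loop over EIGHT_BIT_POWERS that extracts, multiplies and recombines the eight individual bits with the single bitwise expression (a % 256) & (b % 256).
import Mathlib
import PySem

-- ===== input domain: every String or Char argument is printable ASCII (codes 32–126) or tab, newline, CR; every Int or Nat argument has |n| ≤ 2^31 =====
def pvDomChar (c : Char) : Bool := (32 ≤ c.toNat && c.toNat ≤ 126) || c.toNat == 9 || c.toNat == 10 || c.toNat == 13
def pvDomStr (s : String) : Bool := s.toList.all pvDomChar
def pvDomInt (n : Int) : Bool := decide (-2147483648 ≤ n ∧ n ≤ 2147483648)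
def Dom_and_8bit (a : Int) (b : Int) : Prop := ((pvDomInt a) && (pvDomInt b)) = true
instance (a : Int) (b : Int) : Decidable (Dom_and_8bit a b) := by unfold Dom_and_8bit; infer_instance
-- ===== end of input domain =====

-- B replaces A's 8-iteration bit-extraction loop by one bitwise expression (a % 256) & (b % 256); objective: idiomatic.

-- ===== PORT A =====
def EIGHT_BIT_POWERS : List Int := [1, 2, 4, 8, 16, 32, 64, 128]

def and_8bit (a : Int) (b : Int) : Int :=
  EIGHT_BIT_POWERS.foldl (fun result power =>
    let bit_a := PySem.Int.mod (PySem.Int.floordiv a power) 2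
    let bit_b := PySem.Int.mod (PySem.Int.floordiv b power) 2
    let bit_and := bit_a * bit_b
    result + bit_and * power) 0

-- ===== PORT B =====
-- Python '&' on ints is two's-complement bitwise AND = Int.land; both operands here are nonnegative (a % 256).
def and_8bit_alt (a : Int) (b : Int) : Int :=
  Int.land (PySem.Int.mod a 256) (PySem.Int.mod b 256)

-- ===== PRECONDITION & SPEC =====
def Spec_and_8bit (a : Int) (b : Int) (out : Int) : Prop := out = and_8bit_alt a b
instance (a : Int) (b : Int) (out : Int) : Decidable (Spec_and_8bit a b out) := by unfold Spec_and_8bit; infer_instance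

-- ===== CLAIM (what is proved, stated in full; the proofs are below) =====
def Claim_equal_and_8bit : Prop := ∀ (a : Int) (b : Int), Dom_and_8bit a b → Spec_and_8bit a b (and_8bit a b)

-- ===== LEMMAS AND PROOFS =====

-- bit i of x &&& y is the product of bit i of x and bit i of y
theorem land_bit (x y i : Nat) : (x &&& y) / 2 ^ i % 2 = x / 2 ^ i % 2 * (y / 2 ^ i % 2) := by
  have h := Nat.testBit_and x y i
  simp only [Nat.testBit_eq_decide_div_mod_eq] at h
  have a1 : x / 2 ^ i % 2 < 2 := Nat.mod_lt _ (by norm_num)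
  have a2 : y / 2 ^ i % 2 < 2 := Nat.mod_lt _ (by norm_num)
  have a3 : (x &&& y) / 2 ^ i % 2 < 2 := Nat.mod_lt _ (by norm_num)
  interval_cases h1 : x / 2 ^ i % 2 <;> interval_cases h2 : y / 2 ^ i % 2 <;> simp_all

theorem and_8bit_spec : Claim_equal_and_8bit := by
  unfold Claim_equal_and_8bit
  intro a b _
  unfold Spec_and_8bit and_8bit and_8bit_alt EIGHT_BIT_POWERS
  have h2 : (0:Int) < 2 := by norm_num
  simp only [List.foldl, PySem.Int.mod_eq_emod_of_pos h2,
    PySem.Int.mod_eq_emod_of_pos (show (0:Int) < 256 by norm_num),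
    PySem.Int.floordiv_eq_ediv_of_pos (show (0:Int) < 1 by norm_num),
    PySem.Int.floordiv_eq_ediv_of_pos (show (0:Int) < 2 by norm_num),
    PySem.Int.floordiv_eq_ediv_of_pos (show (0:Int) < 4 by norm_num),
    PySem.Int.floordiv_eq_ediv_of_pos (show (0:Int) < 8 by norm_num),
    PySem.Int.floordiv_eq_ediv_of_pos (show (0:Int) < 16 by norm_num),
    PySem.Int.floordiv_eq_ediv_of_pos (show (0:Int) < 32 by norm_num),
    PySem.Int.floordiv_eq_ediv_of_pos (show (0:Int) < 64 by norm_num),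
    PySem.Int.floordiv_eq_ediv_of_pos (show (0:Int) < 128 by norm_num)]
  set x := (a % 256).toNat with hxdef
  set y := (b % 256).toNat with hydef
  have hx : (x : Int) = a % 256 := Int.toNat_of_nonneg (Int.emod_nonneg a (by norm_num))
  have hy : (y : Int) = b % 256 := Int.toNat_of_nonneg (Int.emod_nonneg b (by norm_num))
  have hx256 : x < 256 := by
    have := Int.emod_lt_of_pos a (show (0:Int) < 256 by norm_num); omega
  have hw : x &&& y < 256 := lt_of_le_of_lt Nat.and_le_left hx256
  -- rewrite the right-hand side as a cast of the Nat-level AND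
  have hrhs : Int.land (a % 256) (b % 256) = ((x &&& y : Nat) : Int) := by
    rw [← hx, ← hy]; rfl
  rw [hrhs]
  -- per-bit: each product of Int bits is the corresponding bit of x &&& y
  have g1 : a / 1 % 2 * (b / 1 % 2) = ((x &&& y) / 1 % 2 : Nat) := by
    have c1 : a / 1 % 2 = ((x / 1 % 2 : Nat) : Int) := by omega
    have c2 : b / 1 % 2 = ((y / 1 % 2 : Nat) : Int) := by omega
    have l := land_bit x y 0
    norm_num at l
    rw [c1, c2, ← Nat.cast_mul]
    simp only [Nat.div_one]
    exact_mod_cast l.symm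
  have g2 : a / 2 % 2 * (b / 2 % 2) = ((x &&& y) / 2 % 2 : Nat) := by
    have c1 : a / 2 % 2 = ((x / 2 % 2 : Nat) : Int) := by omega
    have c2 : b / 2 % 2 = ((y / 2 % 2 : Nat) : Int) := by omega
    have l := land_bit x y 1
    norm_num at l
    rw [c1, c2, ← Nat.cast_mul]
    exact_mod_cast l.symm
  have g4 : a / 4 % 2 * (b / 4 % 2) = ((x &&& y) / 4 % 2 : Nat) := by
    have c1 : a / 4 % 2 = ((x / 4 % 2 : Nat) : Int) := by omega
    have c2 : b / 4 % 2 = ((y / 4 % 2 : Nat) : Int) := by omega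
    have l := land_bit x y 2
    norm_num at l
    rw [c1, c2, ← Nat.cast_mul]
    exact_mod_cast l.symm
  have g8 : a / 8 % 2 * (b / 8 % 2) = ((x &&& y) / 8 % 2 : Nat) := by
    have c1 : a / 8 % 2 = ((x / 8 % 2 : Nat) : Int) := by omega
    have c2 : b / 8 % 2 = ((y / 8 % 2 : Nat) : Int) := by omega
    have l := land_bit x y 3
    norm_num at l
    rw [c1, c2, ← Nat.cast_mul]
    exact_mod_cast l.symm
  have g16 : a / 16 % 2 * (b / 16 % 2) = ((x &&& y) / 16 % 2 : Nat) := by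
    have c1 : a / 16 % 2 = ((x / 16 % 2 : Nat) : Int) := by omega
    have c2 : b / 16 % 2 = ((y / 16 % 2 : Nat) : Int) := by omega
    have l := land_bit x y 4
    norm_num at l
    rw [c1, c2, ← Nat.cast_mul]
    exact_mod_cast l.symm
  have g32 : a / 32 % 2 * (b / 32 % 2) = ((x &&& y) / 32 % 2 : Nat) := by
    have c1 : a / 32 % 2 = ((x / 32 % 2 : Nat) : Int) := by omega
    have c2 : b / 32 % 2 = ((y / 32 % 2 : Nat) : Int) := by omega
    have l := land_bit x y 5
    norm_num at l
    rw [c1, c2, ← Nat.cast_mul]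
    exact_mod_cast l.symm
  have g64 : a / 64 % 2 * (b / 64 % 2) = ((x &&& y) / 64 % 2 : Nat) := by
    have c1 : a / 64 % 2 = ((x / 64 % 2 : Nat) : Int) := by omega
    have c2 : b / 64 % 2 = ((y / 64 % 2 : Nat) : Int) := by omega
    have l := land_bit x y 6
    norm_num at l
    rw [c1, c2, ← Nat.cast_mul]
    exact_mod_cast l.symm
  have g128 : a / 128 % 2 * (b / 128 % 2) = ((x &&& y) / 128 % 2 : Nat) := by
    have c1 : a / 128 % 2 = ((x / 128 % 2 : Nat) : Int) := by omega
    have c2 : b / 128 % 2 = ((y / 128 % 2 : Nat) : Int) := by omega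
    have l := land_bit x y 7
    norm_num at l
    rw [c1, c2, ← Nat.cast_mul]
    exact_mod_cast l.symm
  rw [g1, g2, g4, g8, g16, g32, g64, g128]
  omega
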